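-- pv_equiv track=rewrite | github.com/M-asaki-K/Dokodemo-Nur | dokodemonur.py | adjacent_curvy_indices_in_sequence
-- ===== SOURCE A (Python) =====
-- def adjacent_curvy_indices_in_sequence(sequence):
--     adj, prev_item = {}, None
--     for item in sequence:
--         kind, info = item
--         if kind in ("conn_from_A", "conn", "conn_to_B"):
--             a, b = info; adj.setdefault((a, b), set())
--         if kind == "curvy":
--             i, _ = info
--             if prev_item is not None and prev_item[0] in ("conn_from_A", "conn"):
--                 a, b = prev_item[1]
--                 adj.setdefault((a, b), set()).add(i)
--         prev_item = item
--     return adj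
-- ===== SOURCE B (Python) =====
-- def adjacent_curvy_indices_in_sequence(sequence):
--     items = list(sequence)
--     adj = {}
--     # pass 1: register one empty bucket per connection key, in first-occurrence order
--     for kind, info in items:
--         if kind in ("conn_from_A", "conn", "conn_to_B"):
--             adj.setdefault(info, set())
--     # pass 2: every curvy item directly after a conn_from_A/conn item joins that key's bucket
--     for prev, cur in zip(items, items[1:]):
--         if cur[0] == "curvy" and prev[0] in ("conn_from_A", "conn"):
--             adj[prev[1]].add(cur[1][0])  # key present: registered in pass 1
--     return adj
-- ===== Notes on version B (the rewrite author's own statement) =====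
-- stated objective: alternative
-- what changed: Replaces A's single interleaved loop carrying prev_item state with two stateless linear passes: one that registers every connection key, and one over zip(items, items[1:]) that adds curvy indices by direct dict indexing (no setdefault needed, since pass 1 guarantees the key exists).
import Mathlib
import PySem

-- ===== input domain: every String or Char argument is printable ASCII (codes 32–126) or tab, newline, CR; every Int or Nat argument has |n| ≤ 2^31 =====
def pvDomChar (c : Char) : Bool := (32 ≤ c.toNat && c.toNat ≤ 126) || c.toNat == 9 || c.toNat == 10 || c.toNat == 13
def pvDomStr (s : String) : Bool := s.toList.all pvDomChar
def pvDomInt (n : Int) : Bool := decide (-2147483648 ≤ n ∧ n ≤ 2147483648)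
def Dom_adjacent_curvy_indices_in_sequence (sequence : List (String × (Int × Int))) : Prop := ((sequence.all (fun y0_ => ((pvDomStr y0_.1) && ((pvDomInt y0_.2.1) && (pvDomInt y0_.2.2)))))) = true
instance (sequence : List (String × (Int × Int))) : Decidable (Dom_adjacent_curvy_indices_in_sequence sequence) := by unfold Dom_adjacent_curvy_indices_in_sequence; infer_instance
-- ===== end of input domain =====

-- B replaces A's single interleaved loop (with prev_item state) by two stateless passes:
-- register all connection keys, then scan consecutive pairs; same return value (alternative decomposition, not faster).

-- ===== PORT A =====
-- A's loop body (one Python iteration: conn-key setdefault, then the curvy branch using prev_item)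
def pvStepA (st : PySem.Dict (Int × Int) (PySem.Set Int) × Option (String × (Int × Int)))
    (item : String × (Int × Int)) : PySem.Dict (Int × Int) (PySem.Set Int) × Option (String × (Int × Int)) :=
  let adj := st.1
  let adj := if item.1 = "conn_from_A" ∨ item.1 = "conn" ∨ item.1 = "conn_to_B" then
      adj.setdefault item.2 PySem.Set.empty else adj
  let adj := if item.1 = "curvy" then
      match st.2 with
      | some prev =>
        if prev.1 = "conn_from_A" ∨ prev.1 = "conn" then
          -- adj.setdefault((a,b), set()).add(i) : setdefault, then write back the enlarged set
          let d := adj.setdefault prev.2 PySem.Set.empty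
          d.insert prev.2 (PySem.Set.add (d.getD prev.2 PySem.Set.empty) item.2.1)
        else adj
      | none => adj
    else adj
  (adj, some item)

def adjacent_curvy_indices_in_sequence (sequence : List (String × (Int × Int))) : List (Int × Int × List Int) :=
  let st := sequence.foldl pvStepA (PySem.Dict.empty, none)
  st.1.items.map (fun p => (p.1.1, p.1.2, p.2))

-- ===== PORT B =====
-- pass 1 body: register one empty bucket per connection key
def pvReg (d : PySem.Dict (Int × Int) (PySem.Set Int)) (item : String × (Int × Int)) :
    PySem.Dict (Int × Int) (PySem.Set Int) :=
  if item.1 = "conn_from_A" ∨ item.1 = "conn" ∨ item.1 = "conn_to_B" then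
    d.setdefault item.2 PySem.Set.empty else d

-- pass 2 body: adj[prev[1]].add(cur[1][0]); the key is always present (registered in pass 1),
-- so the in-place set add is exactly Dict.modify
def pvCurv (d : PySem.Dict (Int × Int) (PySem.Set Int))
    (pc : (String × (Int × Int)) × (String × (Int × Int))) : PySem.Dict (Int × Int) (PySem.Set Int) :=
  if pc.2.1 = "curvy" ∧ (pc.1.1 = "conn_from_A" ∨ pc.1.1 = "conn") then
    d.modify pc.1.2 PySem.Set.empty (fun s => PySem.Set.add s pc.2.2.1) else d

def adjacent_curvy_indices_in_sequence_alt (sequence : List (String × (Int × Int))) : List (Int × Int × List Int) :=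
  let adj := sequence.foldl pvReg PySem.Dict.empty
  let adj := (sequence.zip sequence.tail).foldl pvCurv adj
  adj.items.map (fun p => (p.1.1, p.1.2, p.2))

-- ===== PRECONDITION & SPEC =====
def Spec_adjacent_curvy_indices_in_sequence (sequence : List (String × (Int × Int))) (out : List (Int × Int × List Int)) : Prop := out = adjacent_curvy_indices_in_sequence_alt sequence
instance (sequence : List (String × (Int × Int))) (out : List (Int × Int × List Int)) : Decidable (Spec_adjacent_curvy_indices_in_sequence sequence out) := by unfold Spec_adjacent_curvy_indices_in_sequence; infer_instance

-- ===== CLAIM (what is proved, stated in full; the proofs are below) =====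
def Claim_equal_adjacent_curvy_indices_in_sequence : Prop := ∀ (sequence : List (String × (Int × Int))), Dom_adjacent_curvy_indices_in_sequence sequence → Spec_adjacent_curvy_indices_in_sequence sequence (adjacent_curvy_indices_in_sequence sequence)

-- ===== LEMMAS AND PROOFS =====

-- the in-place "add index i to the bucket of key k"
def pvAddI (d : PySem.Dict (Int × Int) (PySem.Set Int)) (k : Int × Int) (i : Int) :
    PySem.Dict (Int × Int) (PySem.Set Int) :=
  d.modify k PySem.Set.empty (fun s => PySem.Set.add s i)

-- the consecutive pairs A's prev_item mechanism walks through
def pvPairs (prev : Option (String × (Int × Int))) (l : List (String × (Int × Int))) :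
    List ((String × (Int × Int)) × (String × (Int × Int))) :=
  match prev with
  | none => l.zip l.tail
  | some p => (p :: l).zip l

lemma pvContains_reg_mono (d : PySem.Dict (Int × Int) (PySem.Set Int)) (x : String × (Int × Int))
    (k : Int × Int) (h : d.contains k = true) : (pvReg d x).contains k = true := by
  unfold pvReg PySem.Dict.setdefault
  split_ifs with h1 h2 <;> simp_all [PySem.Dict.contains, List.any_append]

lemma pvContains_reg_self (d : PySem.Dict (Int × Int) (PySem.Set Int)) (x : String × (Int × Int))
    (hx : x.1 = "conn_from_A" ∨ x.1 = "conn" ∨ x.1 = "conn_to_B") :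
    (pvReg d x).contains x.2 = true := by
  unfold pvReg PySem.Dict.setdefault
  by_cases h2 : d.contains x.2 = true
  · simp [hx, h2]
  · simp only [hx, if_true, h2]
    simp [PySem.Dict.contains, List.any_append]

lemma pvContains_addI (d : PySem.Dict (Int × Int) (PySem.Set Int)) (k k' : Int × Int) (i : Int)
    (hk : d.contains k = true) : (pvAddI d k i).contains k' = d.contains k' := by
  unfold pvAddI
  rw [PySem.Dict.contains_modify]
  by_cases hb : k' = k
  · subst hb; simp [hk]
  · simp [hb]

lemma pv_get?_mk_append_right (l₁ l₂ : List ((Int × Int) × PySem.Set Int)) (k : Int × Int)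
    (h : (PySem.Dict.mk l₁).contains k = true) :
    (PySem.Dict.mk (l₁ ++ l₂)).get? k = (PySem.Dict.mk l₁).get? k := by
  induction l₁ with
  | nil => simp [PySem.Dict.contains] at h
  | cons p t ih =>
    rw [List.cons_append, PySem.Dict.get?_mk_cons, PySem.Dict.get?_mk_cons]
    by_cases hpk : (p.1 == k) = true
    · simp [hpk]
    · simp only [hpk]
      apply ih
      simp only [PySem.Dict.contains, List.any_cons, Bool.or_eq_true] at h ⊢
      tauto

-- one pass-1 step commutes with an in-place add at an already-present key
lemma pvReg_addI_comm (d : PySem.Dict (Int × Int) (PySem.Set Int)) (x : String × (Int × Int))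
    (k : Int × Int) (i : Int) (hk : d.contains k = true) :
    pvReg (pvAddI d k i) x = pvAddI (pvReg d x) k i := by
  unfold pvReg
  by_cases hx : x.1 = "conn_from_A" ∨ x.1 = "conn" ∨ x.1 = "conn_to_B"
  · simp only [hx, if_true]
    by_cases hc : d.contains x.2 = true
    · rw [PySem.Dict.setdefault_of_contains _ _
          (show (pvAddI d k i).contains x.2 = true by rw [pvContains_addI d k x.2 i hk]; exact hc),
        PySem.Dict.setdefault_of_contains _ _ hc]
    · have hcf : d.contains x.2 = false := by simpa using hc
      have hcf' : (pvAddI d k i).contains x.2 = false := by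
        rw [pvContains_addI d k x.2 i hk]; exact hcf
      have hne : (x.2 == k) = false := by
        rw [beq_eq_false_iff_ne]; intro hb; rw [hb] at hcf; rw [hk] at hcf; cases hcf
      rw [PySem.Dict.setdefault_of_not_contains _ _ hcf',
        PySem.Dict.setdefault_of_not_contains _ _ hcf]
      -- compute both sides as explicit item lists
      have hA : pvAddI d k i = PySem.Dict.mk (d.items.map
          (fun p => if (p.1 == k) = true then (k, PySem.Set.add (d.getD k PySem.Set.empty) i) else p)) := by
        unfold pvAddI PySem.Dict.modify PySem.Dict.insert
        rw [if_pos hk]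
      have h1 : (pvAddI d k i).insert x.2 PySem.Set.empty
          = PySem.Dict.mk ((pvAddI d k i).items ++ [(x.2, PySem.Set.empty)]) := by
        unfold PySem.Dict.insert; rw [if_neg (by rw [hcf']; exact Bool.false_ne_true)]
      have h2 : d.insert x.2 PySem.Set.empty = PySem.Dict.mk (d.items ++ [(x.2, PySem.Set.empty)]) := by
        unfold PySem.Dict.insert; rw [if_neg (by rw [hcf]; exact Bool.false_ne_true)]
      have hck : (PySem.Dict.mk (d.items ++ [(x.2, PySem.Set.empty)])).contains k = true := by
        simp only [PySem.Dict.contains] at hk ⊢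
        simp [List.any_append, hk]
      have hgd : (PySem.Dict.mk (d.items ++ [(x.2, PySem.Set.empty)])).getD k PySem.Set.empty
          = d.getD k PySem.Set.empty := by
        rw [PySem.Dict.getD_eq_get?_getD, PySem.Dict.getD_eq_get?_getD,
          pv_get?_mk_append_right d.items _ k hk]
      rw [h1, h2, hA]
      unfold pvAddI PySem.Dict.modify PySem.Dict.insert
      rw [if_pos hck, hgd]
      simp
      intro heq
      rw [heq] at hne
      simp at hne
  · simp [hx]

-- the whole pass 1 commutes with an in-place add at an already-present key
lemma pvFoldReg_addI_comm (l : List (String × (Int × Int)))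
    (d : PySem.Dict (Int × Int) (PySem.Set Int)) (k : Int × Int) (i : Int)
    (hk : d.contains k = true) :
    l.foldl pvReg (pvAddI d k i) = pvAddI (l.foldl pvReg d) k i := by
  induction l generalizing d with
  | nil => rfl
  | cons x t ih =>
    simp only [List.foldl_cons]
    rw [pvReg_addI_comm d x k i hk]
    exact ih (pvReg d x) (pvContains_reg_mono d x k hk)

-- A's interleaved loop equals pass 1 followed by pass 2 over the remaining pairs
lemma pvMain (l : List (String × (Int × Int)))
    (d : PySem.Dict (Int × Int) (PySem.Set Int)) (prev : Option (String × (Int × Int)))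
    (hinv : ∀ p, prev = some p → (p.1 = "conn_from_A" ∨ p.1 = "conn") → d.contains p.2 = true) :
    (l.foldl pvStepA (d, prev)).1 = (pvPairs prev l).foldl pvCurv (l.foldl pvReg d) := by
  induction l generalizing d prev with
  | nil => cases prev <;> simp [pvPairs]
  | cons x t ih =>
    simp only [List.foldl_cons]
    have hinv' : ∀ q, (some x : Option (String × (Int × Int))) = some q →
        (q.1 = "conn_from_A" ∨ q.1 = "conn") → (pvReg d x).contains q.2 = true := by
      intro q hq hcq
      obtain rfl : x = q := Option.some_inj.mp hq
      exact pvContains_reg_self d x (by tauto)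
    cases prev with
    | none =>
      have hA : pvStepA (d, none) x = (pvReg d x, some x) := by
        unfold pvStepA pvReg
        dsimp only
        split_ifs <;> rfl
      rw [hA, ih (pvReg d x) (some x) hinv']
      rfl
    | some p =>
      by_cases hfire : x.1 = "curvy" ∧ (p.1 = "conn_from_A" ∨ p.1 = "conn")
      · -- the curvy branch fires: A updates now, B updates after pass 1; they commute
        have hcp : d.contains p.2 = true := hinv p rfl hfire.2
        have hce : (pvReg d x).contains p.2 = true := pvContains_reg_mono d x p.2 hcp
        have hA : pvStepA (d, some p) x = (pvAddI (pvReg d x) p.2 x.2.1, some x) := by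
          unfold pvStepA
          dsimp only
          rw [show (if x.1 = "conn_from_A" ∨ x.1 = "conn" ∨ x.1 = "conn_to_B" then
              d.setdefault x.2 PySem.Set.empty else d) = pvReg d x from rfl]
          rw [if_pos hfire.1, if_pos hfire.2, PySem.Dict.setdefault_of_contains _ _ hce]
          rfl
        rw [hA, ih (pvAddI (pvReg d x) p.2 x.2.1) (some x)
          (by intro q hq hcq; rw [pvContains_addI _ _ _ _ hce]; exact hinv' q hq hcq)]
        rw [pvFoldReg_addI_comm t (pvReg d x) p.2 x.2.1 hce]
        show (pvPairs (some x) t).foldl pvCurv (pvAddI (t.foldl pvReg (pvReg d x)) p.2 x.2.1)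
            = ((p, x) :: pvPairs (some x) t).foldl pvCurv (t.foldl pvReg (pvReg d x))
        rw [List.foldl_cons,
          show pvCurv (t.foldl pvReg (pvReg d x)) (p, x)
            = pvAddI (t.foldl pvReg (pvReg d x)) p.2 x.2.1 by unfold pvCurv pvAddI; rw [if_pos hfire]]
      · -- nothing to add for this pair
        have hA : pvStepA (d, some p) x = (pvReg d x, some x) := by
          unfold pvStepA
          dsimp only
          rw [show (if x.1 = "conn_from_A" ∨ x.1 = "conn" ∨ x.1 = "conn_to_B" then
              d.setdefault x.2 PySem.Set.empty else d) = pvReg d x from rfl]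
          by_cases hcv : x.1 = "curvy"
          · rw [if_pos hcv, if_neg (fun hc => hfire ⟨hcv, hc⟩)]
          · rw [if_neg hcv]
        rw [hA, ih (pvReg d x) (some x) hinv']
        show (pvPairs (some x) t).foldl pvCurv (t.foldl pvReg (pvReg d x))
            = ((p, x) :: pvPairs (some x) t).foldl pvCurv (t.foldl pvReg (pvReg d x))
        rw [List.foldl_cons,
          show pvCurv (t.foldl pvReg (pvReg d x)) (p, x)
            = t.foldl pvReg (pvReg d x) by unfold pvCurv; rw [if_neg hfire]]

-- ===== VERDICT (by name: the statement is the Claim_ definition above) =====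
theorem adjacent_curvy_indices_in_sequence_spec : Claim_equal_adjacent_curvy_indices_in_sequence := by
  intro sequence _
  unfold Spec_adjacent_curvy_indices_in_sequence
  show (sequence.foldl pvStepA (PySem.Dict.empty, none)).1.items.map (fun p => (p.1.1, p.1.2, p.2))
      = ((sequence.zip sequence.tail).foldl pvCurv (sequence.foldl pvReg PySem.Dict.empty)).items.map
          (fun p => (p.1.1, p.1.2, p.2))
  rw [pvMain sequence PySem.Dict.empty none (by simp)]
  rfl
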